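-- pv_equiv track=rewrite | github.com/nascloud/configflow | backend/converters/mosdns.py | _build_ruleset_tag_map
-- ===== SOURCE A (Python) =====
-- from typing import Dict, Any, List
--
-- def _normalize_ruleset_id(rule_set_id: str) -> str:
--     if not rule_set_id:
--         return ''
--     prefix = 'ruleset_'
--     return rule_set_id[len(prefix):] if rule_set_id.startswith(prefix) else rule_set_id
--
-- def _build_ruleset_tag_map(rule_sets_map: Dict[str, Dict[str, Any]], ruleset_order: List[str]) -> Dict[str, str]:
--     """Map each ruleset id to a tag derived from its name, keeping tags unique"""
--     tag_map: Dict[str, str] = {}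
--     name_usage: Dict[str, int] = {}
--
--     for ruleset_id in ruleset_order:
--         rule_set = rule_sets_map.get(ruleset_id, {})
--         name = (rule_set.get('name') or '').strip()
--         if not name:
--             name = _normalize_ruleset_id(ruleset_id)
--
--         count = name_usage.get(name, 0)
--         tag = f"{name}_{count + 1}" if count else name
--         name_usage[name] = count + 1
--         tag_map[ruleset_id] = tag
--
--     return tag_map
-- ===== SOURCE B (Python) =====
-- def _resolve_name(rule_sets_map, ruleset_id):
--     name = (rule_sets_map.get(ruleset_id, {}).get('name') or '').strip()
--     if name:
--         return name
--     return ruleset_id[len('ruleset_'):] if ruleset_id.startswith('ruleset_') else ruleset_id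
--
--
-- def _build_ruleset_tag_map(rule_sets_map, ruleset_order):
--     """Map each ruleset id to a tag derived from its name, keeping tags unique."""
--     # Pass 1: group the ids by their resolved name.
--     groups = {}
--     for ruleset_id in ruleset_order:
--         groups.setdefault(_resolve_name(rule_sets_map, ruleset_id), []).append(ruleset_id)
--     # Pass 2: within each group, the tag is determined by the position in the group.
--     tag_of = {}
--     for name, ids in groups.items():
--         for idx, ruleset_id in enumerate(ids):
--             tag_of[ruleset_id] = name if idx == 0 else f"{name}_{idx + 1}"
--     # Pass 3: emit in ruleset_order so the dict's insertion order matches.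
--     return {ruleset_id: tag_of[ruleset_id] for ruleset_id in ruleset_order}
-- ===== Notes on version B (the rewrite author's own statement) =====
-- stated objective: alternative
-- what changed: Replaces A's single ordered pass with running name-usage counters by a three-stage grouping algorithm: group ids by resolved name, assign each id its tag from its index within its group, then emit the map by re-iterating ruleset_order.
import Mathlib
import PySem

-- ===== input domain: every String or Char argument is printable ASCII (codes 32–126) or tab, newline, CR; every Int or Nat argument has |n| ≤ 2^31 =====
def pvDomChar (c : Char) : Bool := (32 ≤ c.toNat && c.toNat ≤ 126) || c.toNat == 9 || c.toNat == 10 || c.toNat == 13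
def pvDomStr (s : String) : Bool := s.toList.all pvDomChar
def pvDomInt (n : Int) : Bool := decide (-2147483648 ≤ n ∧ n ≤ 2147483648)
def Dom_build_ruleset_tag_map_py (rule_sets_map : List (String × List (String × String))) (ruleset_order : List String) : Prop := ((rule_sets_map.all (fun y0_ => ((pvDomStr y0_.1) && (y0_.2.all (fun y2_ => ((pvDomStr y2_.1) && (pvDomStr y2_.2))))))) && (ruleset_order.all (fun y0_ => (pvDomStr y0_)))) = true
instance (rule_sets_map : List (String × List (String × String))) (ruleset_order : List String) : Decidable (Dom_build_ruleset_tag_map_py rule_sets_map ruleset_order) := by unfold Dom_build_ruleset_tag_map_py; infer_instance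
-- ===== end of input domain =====

-- B replaces A's single ordered pass with running name-usage counters by a three-stage
-- grouping algorithm (group ids by resolved name, tag = index within group, emit in order); alternative decomposition, not faster.


-- ===== PORT A =====
-- helper _normalize_ruleset_id, transliterated
def normalize_ruleset_id (rule_set_id : String) : String :=
  if rule_set_id = "" then ""
  else if PySem.Str.startswith rule_set_id "ruleset_"
       then PySem.Str.slice rule_set_id (some 8) none   -- rule_set_id[len('ruleset_'):]
       else rule_set_id

-- the body of A's for-loop (state: (tag_map, name_usage))
def buildStepA (rule_sets_map : List (String × List (String × String)))
    (st : PySem.Dict String String × PySem.Dict String Int) (ruleset_id : String) :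
    PySem.Dict String String × PySem.Dict String Int :=
  let rule_set := (List.lookup ruleset_id rule_sets_map).getD []
  let name0 := PySem.Str.strip ((List.lookup "name" rule_set).getD "")
  let name := if name0 = "" then normalize_ruleset_id ruleset_id else name0
  let count := st.2.getD name 0
  let tag := if count ≠ 0 then name ++ "_" ++ PySem.Int.toStr (count + 1) else name
  (st.1.insert ruleset_id tag, st.2.insert name (count + 1))

def build_ruleset_tag_map_py (rule_sets_map : List (String × List (String × String))) (ruleset_order : List String) : List (String × String) :=
  (ruleset_order.foldl (buildStepA rule_sets_map) (PySem.Dict.empty, PySem.Dict.empty)).1.items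

-- ===== PORT B =====
-- helper _resolve_name, transliterated
def resolve_name (rule_sets_map : List (String × List (String × String))) (ruleset_id : String) : String :=
  let name := PySem.Str.strip ((List.lookup "name" ((List.lookup ruleset_id rule_sets_map).getD [])).getD "")
  if name ≠ "" then name
  else if PySem.Str.startswith ruleset_id "ruleset_"
       then PySem.Str.slice ruleset_id (some 8) none
       else ruleset_id

def build_ruleset_tag_map_py_alt (rule_sets_map : List (String × List (String × String))) (ruleset_order : List String) : List (String × String) :=
  -- Pass 1: group ids by resolved name (groups.setdefault(name, []).append(rid))
  let groups : PySem.Dict String (List String) :=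
    ruleset_order.foldl (fun g rid => g.modify (resolve_name rule_sets_map rid) [] (fun l => l ++ [rid])) PySem.Dict.empty
  -- Pass 2: tag from the index within the group
  let tag_of : PySem.Dict String String :=
    groups.items.foldl (fun d p =>
      (PySem.List.enumerate p.2 0).foldl
        (fun d q => d.insert q.2 (if q.1 = 0 then p.1 else p.1 ++ "_" ++ PySem.Int.toStr (q.1 + 1))) d)
      PySem.Dict.empty
  -- Pass 3: emit in ruleset_order; tag_of[rid] never raises (every rid of ruleset_order is in its group),
  -- so get?/getD "" is exact here
  (ruleset_order.foldl (fun d rid => d.insert rid ((tag_of.get? rid).getD "")) PySem.Dict.empty).items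

-- ===== PRECONDITION & SPEC =====
def Spec_build_ruleset_tag_map_py (rule_sets_map : List (String × List (String × String))) (ruleset_order : List String) (out : List (String × String)) : Prop := out = build_ruleset_tag_map_py_alt rule_sets_map ruleset_order
instance (rule_sets_map : List (String × List (String × String))) (ruleset_order : List String) (out : List (String × String)) : Decidable (Spec_build_ruleset_tag_map_py rule_sets_map ruleset_order out) := by unfold Spec_build_ruleset_tag_map_py; infer_instance

-- ===== CLAIM (what is proved, stated in full; the proofs are below) =====
def Claim_equal_build_ruleset_tag_map_py : Prop := ∀ (rule_sets_map : List (String × List (String × String))) (ruleset_order : List String), Dom_build_ruleset_tag_map_py rule_sets_map ruleset_order → Spec_build_ruleset_tag_map_py rule_sets_map ruleset_order (build_ruleset_tag_map_py rule_sets_map ruleset_order)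

-- ===== LEMMAS AND PROOFS =====

-- A's resolved name (the let-chain inside buildStepA)
def nameA (rule_sets_map : List (String × List (String × String))) (ruleset_id : String) : String :=
  let rule_set := (List.lookup ruleset_id rule_sets_map).getD []
  let name0 := PySem.Str.strip ((List.lookup "name" rule_set).getD "")
  if name0 = "" then normalize_ruleset_id ruleset_id else name0

-- the tag of an id whose resolved name is n and which is the (i+1)-th id of its group
def tagAt (n : String) (i : Int) : String :=
  if i = 0 then n else n ++ "_" ++ PySem.Int.toStr (i + 1)

-- the ids of order whose resolved name is n, in order
def grp (f : String → String) (order : List String) (n : String) : List String :=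
  order.filter (fun x => f x == n)

-- index of the LAST occurrence of r in a list containing r (0 on lists not containing r)
def lastIdx (r : String) : List String → Nat
  | [] => 0
  | _ :: xs => if r ∈ xs then lastIdx r xs + 1 else 0

-- canonical form: insert each id with the tag derived from the count of its name in the prefix
def cRes (f : String → String) : List String → List String → PySem.Dict String String → PySem.Dict String String
  | _, [], d => d
  | pre, r :: rest, d =>
      cRes f (pre ++ [r]) rest (d.insert r (tagAt (f r) (((pre.map f).count (f r) : Int))))

-- proof-side names for B's three passes
def groupsD (f : String → String) (order : List String) : PySem.Dict String (List String) :=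
  order.foldl (fun g rid => g.modify (f rid) [] (fun l => l ++ [rid])) PySem.Dict.empty

def tagOfD (f : String → String) (order : List String) : PySem.Dict String String :=
  (groupsD f order).items.foldl (fun d p =>
    (PySem.List.enumerate p.2 0).foldl (fun d q => d.insert q.2 (tagAt p.1 q.1)) d) PySem.Dict.empty

def bRes (f : String → String) (order : List String) : PySem.Dict String String :=
  order.foldl (fun d rid => d.insert rid (((tagOfD f order).get? rid).getD "")) PySem.Dict.empty

lemma alt_eq_bRes (rsm : List (String × List (String × String))) (order : List String) :
    build_ruleset_tag_map_py_alt rsm order = (bRes (resolve_name rsm) order).items := rfl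

lemma nameA_eq (rsm : List (String × List (String × String))) (rid : String) :
    nameA rsm rid = resolve_name rsm rid := by
  simp only [nameA, resolve_name, normalize_ruleset_id]
  by_cases h : PySem.Str.strip ((List.lookup "name" ((List.lookup rid rsm).getD [])).getD "") = ""
  · simp only [h, ne_eq, not_true_eq_false, if_false, if_true]
    by_cases hr : rid = ""
    · subst hr; decide
    · simp [hr]
  · simp [h]

lemma stepA_unfold (rsm : List (String × List (String × String))) (tm : PySem.Dict String String)
    (nu : PySem.Dict String Int) (rid : String) :
    buildStepA rsm (tm, nu) rid =
    (tm.insert rid (tagAt (nameA rsm rid) (nu.getD (nameA rsm rid) 0)),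
     nu.insert (nameA rsm rid) (nu.getD (nameA rsm rid) 0 + 1)) := by
  show (tm.insert rid (if nu.getD (nameA rsm rid) 0 ≠ 0
                    then nameA rsm rid ++ "_" ++ PySem.Int.toStr (nu.getD (nameA rsm rid) 0 + 1)
                    else nameA rsm rid),
     nu.insert (nameA rsm rid) (nu.getD (nameA rsm rid) 0 + 1)) = _
  by_cases h : nu.getD (nameA rsm rid) 0 = 0 <;> simp [tagAt, h]

-- ===== A = canonical form =====
lemma AtoC (rsm : List (String × List (String × String))) :
    ∀ (rest pre : List String) (tm : PySem.Dict String String) (nu : PySem.Dict String Int),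
    (∀ s, nu.getD s 0 = ((pre.map (resolve_name rsm)).count s : Int)) →
    (rest.foldl (buildStepA rsm) (tm, nu)).1 = cRes (resolve_name rsm) pre rest tm := by
  intro rest
  induction rest with
  | nil => intro pre tm nu _; simp [cRes]
  | cons rid rest' ih =>
    intro pre tm nu hinv
    set f := resolve_name rsm with hf
    have hcount : nu.getD (f rid) 0 = (((pre.map f).count (f rid) : Nat) : Int) := hinv (f rid)
    simp only [List.foldl_cons, cRes]
    rw [stepA_unfold, nameA_eq, ← hf, hcount]
    apply ih (pre ++ [rid])
    intro s
    rw [PySem.Dict.getD_insert]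
    by_cases hs : s = f rid
    · subst hs
      rw [if_pos rfl, List.map_append, List.count_append]
      have h1 : ([rid].map f).count (f rid) = 1 := by simp
      rw [h1]; push_cast; ring
    · rw [if_neg hs, hinv s, List.map_append, List.count_append]
      have h0 : ([rid].map f).count s = 0 := by
        simp only [List.map_cons, List.map_nil, List.count_cons, List.count_nil]
        simp [Ne.symm hs]
      rw [h0]; push_cast; ring

-- ===== canonical form: right decomposition =====
lemma cRes_append (f : String → String) :
    ∀ (rest pre : List String) (d : PySem.Dict String String) (r : String),
    cRes f pre (rest ++ [r]) d
      = (cRes f pre rest d).insert r (tagAt (f r) ((((pre ++ rest).map f).count (f r) : Int))) := by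
  intro rest
  induction rest with
  | nil => intro pre d r; simp [cRes]
  | cons x rest' ih =>
    intro pre d r
    simp only [List.cons_append, cRes]
    rw [ih (pre ++ [x])]
    simp [List.append_assoc]

-- ===== lastIdx facts =====
lemma lastIdx_append_ne (r y : String) (h : r ≠ y) :
    ∀ g : List String, lastIdx r (g ++ [y]) = lastIdx r g := by
  intro g
  induction g with
  | nil => simp [lastIdx]
  | cons z zs ih =>
    simp only [List.cons_append, lastIdx, List.mem_append, List.mem_singleton]
    rw [ih]
    by_cases hz : r ∈ zs <;> simp [hz, h]

lemma lastIdx_append_self (r : String) :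
    ∀ g : List String, lastIdx r (g ++ [r]) = g.length := by
  intro g
  induction g with
  | nil => simp [lastIdx]
  | cons z zs ih =>
    simp only [List.cons_append, lastIdx, List.mem_append, List.mem_singleton]
    simp [ih]

-- ===== inner fold of pass 2 (one group) =====
lemma inner_get? (n : String) :
    ∀ (l : List String) (s : Int) (d : PySem.Dict String String) (r : String),
    ((PySem.List.enumerate l s).foldl (fun d q => d.insert q.2 (tagAt n q.1)) d).get? r
      = if r ∈ l then some (tagAt n (s + (lastIdx r l : Int))) else d.get? r := by
  intro l
  induction l with
  | nil => intro s d r; simp [PySem.List.enumerate_nil]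
  | cons x xs ih =>
    intro s d r
    rw [PySem.List.enumerate_cons]
    simp only [List.foldl_cons]
    rw [ih]
    by_cases hxs : r ∈ xs
    · have hmem : r ∈ x :: xs := List.mem_cons_of_mem _ hxs
      rw [if_pos hxs, if_pos hmem]
      have hL : lastIdx r (x :: xs) = lastIdx r xs + 1 := by simp [lastIdx, hxs]
      rw [hL]
      congr 2
      push_cast; ring
    · by_cases hx : r = x
      · subst hx
        rw [if_neg hxs, if_pos List.mem_cons_self, PySem.Dict.get?_insert_self]
        have hL : lastIdx r (r :: xs) = 0 := by simp [lastIdx, hxs]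
        rw [hL]
        simp
      · rw [if_neg hxs, if_neg (by simp [hx, hxs]), PySem.Dict.get?_insert_of_ne _ _ hx]

-- ===== outer fold of pass 2 =====
lemma outer_skip :
    ∀ (ps : List (String × List String)) (d : PySem.Dict String String) (r : String),
    (∀ p ∈ ps, r ∉ p.2) →
    (ps.foldl (fun d p =>
        (PySem.List.enumerate p.2 0).foldl (fun d q => d.insert q.2 (tagAt p.1 q.1)) d) d).get? r
      = d.get? r := by
  intro ps
  induction ps with
  | nil => intro d r _; rfl
  | cons p ps' ih =>
    intro d r h
    simp only [List.foldl_cons]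
    rw [ih _ _ (fun q hq => h q (List.mem_cons_of_mem _ hq)), inner_get?]
    simp [h p List.mem_cons_self]

lemma outer_get? (ps1 ps2 : List (String × List String)) (n : String) (l : List String)
    (d : PySem.Dict String String) (r : String) (hr : r ∈ l) (h2 : ∀ p ∈ ps2, r ∉ p.2) :
    ((ps1 ++ (n, l) :: ps2).foldl (fun d p =>
        (PySem.List.enumerate p.2 0).foldl (fun d q => d.insert q.2 (tagAt p.1 q.1)) d) d).get? r
      = some (tagAt n ((lastIdx r l : Int))) := by
  rw [List.foldl_append, List.foldl_cons, outer_skip _ _ _ h2, inner_get?]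
  simp [hr]

-- ===== pass-1 characterisation =====
lemma groupsD_getD (f : String → String) (order : List String) (n : String) :
    (groupsD f order).getD n [] = grp f order n := by
  unfold groupsD grp
  have : order.foldl (fun g rid => g.modify (f rid) [] (fun l => l ++ [rid])) PySem.Dict.empty
      = (order.map (fun rid => ((f rid, rid) : String × String))).foldl
          (fun g p => g.modify p.1 [] (fun l => l ++ [p.2])) PySem.Dict.empty := by
    rw [List.foldl_map]
  rw [this, PySem.Dict.getD_foldl_modify_append, PySem.Dict.getD_empty]
  simp [List.filter_map, List.map_map, Function.comp_def]

lemma groupsD_keys (f : String → String) (order : List String) :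
    (groupsD f order).keys = PySem.Set.ofList (order.map f) := by
  unfold groupsD
  rw [PySem.Dict.keys_foldl_modify_key]
  simp [PySem.Set.update_nil_left]

lemma groupsD_items (f : String → String) (order : List String) :
    (groupsD f order).items
      = (PySem.Set.ofList (order.map f)).map (fun n => (n, grp f order n)) := by
  rw [PySem.Dict.items_eq_map_keys (groupsD f order)
        (by rw [groupsD_keys]; exact PySem.Set.nodup_ofList _) []]
  rw [groupsD_keys]
  exact List.map_congr_left (fun n _ => by rw [groupsD_getD])

-- ===== pass-2 characterisation =====
lemma tagOfD_get? (f : String → String) (order : List String) (r : String) (hr : r ∈ order) :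
    (tagOfD f order).get? r = some (tagAt (f r) ((lastIdx r (grp f order (f r)) : Int))) := by
  unfold tagOfD
  rw [groupsD_items]
  have hmem : f r ∈ PySem.Set.ofList (order.map f) := by
    rw [PySem.Set.mem_ofList]; exact List.mem_map_of_mem hr
  obtain ⟨k1, k2, hk⟩ := List.append_of_mem hmem
  have hnd : (PySem.Set.ofList (order.map f)).Nodup := PySem.Set.nodup_ofList _
  have hfr2 : f r ∉ k2 := by
    rw [hk] at hnd
    exact (List.nodup_cons.mp (List.nodup_append.mp hnd).2.1).1
  rw [hk, List.map_append, List.map_cons]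
  apply outer_get?
  · unfold grp; rw [List.mem_filter]; exact ⟨hr, by simp⟩
  · intro p hp
    obtain ⟨n', hn', rfl⟩ := List.mem_map.mp hp
    intro hrg
    unfold grp at hrg
    have := (List.mem_filter.mp hrg).2
    have heq : f r = n' := by simpa using this
    exact hfr2 (heq ▸ hn')

-- ===== EqExcept machinery for the last pass =====
lemma contains_eq_of_keys_eq (d1 d2 : PySem.Dict String String) (x : String)
    (h : d1.keys = d2.keys) : d1.contains x = d2.contains x := by
  by_cases hm : x ∈ d1.keys
  · rw [(PySem.Dict.contains_iff_mem_keys _ _).mpr hm,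
        (PySem.Dict.contains_iff_mem_keys _ _).mpr (h ▸ hm)]
  · have h2 : x ∉ d2.keys := h ▸ hm
    cases hh : d1.contains x
    · cases hh2 : d2.contains x
      · rfl
      · exact absurd ((PySem.Dict.contains_iff_mem_keys _ _).mp hh2) h2
    · exact absurd ((PySem.Dict.contains_iff_mem_keys _ _).mp hh) hm

lemma insert_eq_of_agree (d1 d2 : PySem.Dict String String) (k w : String)
    (hkeys : d1.keys = d2.keys) (hnd1 : d1.keys.Nodup) (hnd2 : d2.keys.Nodup)
    (hget : ∀ j, j ≠ k → d1.get? j = d2.get? j) :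
    d1.insert k w = d2.insert k w := by
  apply PySem.Dict.ext
  have hc : d1.contains k = d2.contains k := contains_eq_of_keys_eq _ _ _ hkeys
  have hknew : (d1.insert k w).keys = (d2.insert k w).keys := by
    by_cases h : d1.contains k = true
    · rw [PySem.Dict.keys_insert_of_contains _ _ h,
          PySem.Dict.keys_insert_of_contains _ _ (hc ▸ h), hkeys]
    · have h1 : d1.contains k = false := by simpa using h
      rw [PySem.Dict.keys_insert_of_not_contains _ _ h1,
          PySem.Dict.keys_insert_of_not_contains _ _ (hc ▸ h1), hkeys]
  rw [PySem.Dict.items_eq_map_keys _ (PySem.Dict.nodup_keys_insert _ _ _ hnd1) "",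
      PySem.Dict.items_eq_map_keys _ (PySem.Dict.nodup_keys_insert _ _ _ hnd2) "",
      hknew]
  apply List.map_congr_left
  intro j _
  by_cases hj : j = k
  · subst hj
    rw [PySem.Dict.getD_insert_self, PySem.Dict.getD_insert_self]
  · rw [PySem.Dict.getD_insert_of_ne _ _ _ hj, PySem.Dict.getD_insert_of_ne _ _ _ hj,
        PySem.Dict.getD_eq_get?_getD, PySem.Dict.getD_eq_get?_getD, hget j hj]

lemma fold_agree (k : String) (v1 v2 : String → String) :
    ∀ (l : List String) (d1 d2 : PySem.Dict String String),
    d1.keys = d2.keys → d1.keys.Nodup → d2.keys.Nodup →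
    (∀ j, j ≠ k → d1.get? j = d2.get? j) →
    (∀ x ∈ l, x ≠ k → v1 x = v2 x) →
    let e1 := l.foldl (fun d x => d.insert x (v1 x)) d1
    let e2 := l.foldl (fun d x => d.insert x (v2 x)) d2
    e1.keys = e2.keys ∧ e1.keys.Nodup ∧ e2.keys.Nodup ∧ (∀ j, j ≠ k → e1.get? j = e2.get? j) := by
  intro l
  induction l with
  | nil => intro d1 d2 h1 h2 h3 h4 _; exact ⟨h1, h2, h3, h4⟩
  | cons x xs ih =>
    intro d1 d2 hkeys hnd1 hnd2 hget hv
    simp only [List.foldl_cons]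
    have hc : d1.contains x = d2.contains x := contains_eq_of_keys_eq _ _ _ hkeys
    apply ih
    · by_cases h : d1.contains x = true
      · rw [PySem.Dict.keys_insert_of_contains _ _ h,
            PySem.Dict.keys_insert_of_contains _ _ (hc ▸ h), hkeys]
      · have h1 : d1.contains x = false := by simpa using h
        rw [PySem.Dict.keys_insert_of_not_contains _ _ h1,
            PySem.Dict.keys_insert_of_not_contains _ _ (hc ▸ h1), hkeys]
    · exact PySem.Dict.nodup_keys_insert _ _ _ hnd1
    · exact PySem.Dict.nodup_keys_insert _ _ _ hnd2
    · intro j hj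
      by_cases hjx : j = x
      · subst hjx
        rw [PySem.Dict.get?_insert_self, PySem.Dict.get?_insert_self,
            hv _ List.mem_cons_self hj]
      · rw [PySem.Dict.get?_insert_of_ne _ _ hjx, PySem.Dict.get?_insert_of_ne _ _ hjx]
        exact hget j hj
    · exact fun y hy => hv y (List.mem_cons_of_mem _ hy)

-- ===== grp under append =====
lemma grp_append_singleton (f : String → String) (pre : List String) (rid n : String) :
    grp f (pre ++ [rid]) n = grp f pre n ++ (if f rid == n then [rid] else []) := by
  unfold grp
  rw [List.filter_append]
  by_cases h : f rid == n <;> simp [List.filter, h]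

-- ===== B = canonical form =====
lemma BtoC (f : String → String) (order : List String) :
    bRes f order = cRes f [] order PySem.Dict.empty := by
  induction order using List.reverseRecOn with
  | nil => rfl
  | append_singleton pre rid ih =>
    have countP_eq : ∀ v : String, (pre.map f).count v = pre.countP (fun x => f x == v) := by
      intro v
      rw [List.count, List.countP_map]
      rfl
    -- value inserted for rid
    have hw : (((tagOfD f (pre ++ [rid])).get? rid).getD "")
        = tagAt (f rid) (((pre.map f).count (f rid) : Int)) := by
      rw [tagOfD_get? f (pre ++ [rid]) rid (by simp)]
      rw [grp_append_singleton, if_pos (by simp), lastIdx_append_self]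
      unfold grp
      rw [← List.countP_eq_length_filter, ← countP_eq]
      rfl
    -- values for earlier ids agree
    have hv : ∀ x ∈ pre, x ≠ rid →
        (((tagOfD f (pre ++ [rid])).get? x).getD "") = (((tagOfD f pre).get? x).getD "") := by
      intro x hx hne
      rw [tagOfD_get? f (pre ++ [rid]) x (by simp [hx]), tagOfD_get? f pre x hx]
      rw [grp_append_singleton]
      by_cases h : f rid == f x
      · rw [if_pos h, lastIdx_append_ne _ _ hne]
      · rw [if_neg h, List.append_nil]
    have hfold := fold_agree rid
      (fun r' => ((tagOfD f (pre ++ [rid])).get? r').getD "")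
      (fun r' => ((tagOfD f pre).get? r').getD "")
      pre PySem.Dict.empty PySem.Dict.empty rfl List.nodup_nil List.nodup_nil
      (fun _ _ => rfl) hv
    unfold bRes
    rw [List.foldl_append, List.foldl_cons, List.foldl_nil]
    rw [insert_eq_of_agree _ _ rid _ hfold.1 hfold.2.1 hfold.2.2.1 hfold.2.2.2]
    rw [hw]
    rw [cRes_append]
    simp only [List.nil_append]
    unfold bRes at ih
    rw [ih]

theorem build_eq (rule_sets_map : List (String × List (String × String))) (ruleset_order : List String) :
    build_ruleset_tag_map_py rule_sets_map ruleset_order = build_ruleset_tag_map_py_alt rule_sets_map ruleset_order := by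
  unfold build_ruleset_tag_map_py
  rw [alt_eq_bRes, BtoC]
  rw [AtoC rule_sets_map ruleset_order [] PySem.Dict.empty PySem.Dict.empty
      (by intro s; simp [PySem.Dict.getD_empty])]

-- ===== VERDICT (by name: the statement is the Claim_ definition above) =====
theorem build_ruleset_tag_map_py_spec : Claim_equal_build_ruleset_tag_map_py := by
  intro rsm order _
  unfold Spec_build_ruleset_tag_map_py
  exact build_eq rsm order
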